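-- pv_equiv track=rewrite | github.com/gunnargray-dev/reposcape | src/techdebt.py | _count_duplication_hints
-- ===== SOURCE A (Python) =====
-- def _count_duplication_hints(lines: list[str]) -> int:
--     """Count crude duplication hints: repeated boilerplate lines.
--
--     Args:
--         lines: Source file lines.
--
--     Returns:
--         Integer count of potential duplication hints.
--     """
--     from collections import Counter
--     stripped = [l.strip() for l in lines if l.strip() and not l.strip().startswith("#")]
--     counts = Counter(stripped)
--     common = {"pass", "return", "break", "continue", "...", "return None",
--               "return {}", "return []", "return ''", 'return ""'}
--     return sum(
--         v - 1 for line, v in counts.items()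
--         if v >= 3 and line not in common and len(line) > 5
--     )
-- ===== SOURCE B (Python) =====
-- def _count_duplication_hints(lines: list[str]) -> int:
--     """Count crude duplication hints: repeated boilerplate lines.
--
--     One streaming pass: count only qualifying lines as they arrive and add
--     their marginal contribution (2 on the third occurrence, 1 afterwards).
--     """
--     common = {"pass", "return", "break", "continue", "...", "return None",
--               "return {}", "return []", "return ''", 'return ""'}
--     seen = {}
--     total = 0
--     for l in lines:
--         s = l.strip()
--         if not s or s.startswith("#") or len(s) <= 5 or s in common:
--             continue
--         c = seen.get(s, 0) + 1
--         seen[s] = c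
--         if c == 3:
--             total += 2
--         elif c > 3:
--             total += 1
--     return total
-- ===== Notes on version B (the rewrite author's own statement) =====
-- stated objective: alternative
-- what changed: Replaces building a Counter over all stripped lines and then summing v-1 over qualifying items with a single streaming pass that pre-filters lines (non-empty, non-comment, len>5, not boilerplate) and adds each line's marginal contribution as it arrives (2 on its third occurrence, 1 on each later one).
import Mathlib
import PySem

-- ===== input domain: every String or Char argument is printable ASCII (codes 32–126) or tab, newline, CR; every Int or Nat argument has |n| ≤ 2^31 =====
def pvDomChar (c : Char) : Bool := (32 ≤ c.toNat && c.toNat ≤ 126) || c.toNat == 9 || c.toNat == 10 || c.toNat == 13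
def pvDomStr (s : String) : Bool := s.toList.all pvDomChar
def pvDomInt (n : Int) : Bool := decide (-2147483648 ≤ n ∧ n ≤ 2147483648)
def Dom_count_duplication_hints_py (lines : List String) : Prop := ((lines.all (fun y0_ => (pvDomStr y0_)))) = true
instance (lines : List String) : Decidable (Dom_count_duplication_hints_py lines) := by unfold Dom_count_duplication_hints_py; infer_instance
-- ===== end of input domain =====

-- B replaces Counter-then-sum with one streaming pass that pre-filters lines and adds each
-- qualifying line's marginal contribution (2 on its third occurrence, 1 afterwards); objective: alternative.

-- ===== PORT A =====
def pvCommon : PySem.Set String :=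
  PySem.Set.ofList ["pass", "return", "break", "continue", "...", "return None",
                    "return {}", "return []", "return ''", "return \"\""]

def count_duplication_hints_py (lines : List String) : Int :=
  let stripped := lines.filterMap (fun l =>
    let s := PySem.Str.strip l
    if s ≠ "" ∧ ¬ PySem.Str.startswith s "#" then some s else none)
  let counts := PySem.Dict.counter stripped
  counts.items.foldl (fun acc kv =>
    if kv.2 ≥ 3 ∧ ¬ PySem.Set.contains pvCommon kv.1 ∧ PySem.Str.len kv.1 > 5
    then acc + (kv.2 - 1) else acc) 0

-- ===== PORT B =====
def pvStepB (st : PySem.Dict String Int × Int) (l : String) : PySem.Dict String Int × Int :=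
  let s := PySem.Str.strip l
  if s = "" ∨ PySem.Str.startswith s "#" ∨ PySem.Str.len s ≤ 5 ∨ PySem.Set.contains pvCommon s
  then st
  else
    let c := st.1.getD s 0 + 1
    let seen := st.1.insert s c
    if c = 3 then (seen, st.2 + 2)
    else if c > 3 then (seen, st.2 + 1)
    else (seen, st.2)

def count_duplication_hints_py_alt (lines : List String) : Int :=
  (lines.foldl pvStepB (PySem.Dict.empty, 0)).2

-- ===== PRECONDITION & SPEC =====
def Spec_count_duplication_hints_py (lines : List String) (out : Int) : Prop := out = count_duplication_hints_py_alt lines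
instance (lines : List String) (out : Int) : Decidable (Spec_count_duplication_hints_py lines out) := by unfold Spec_count_duplication_hints_py; infer_instance

-- ===== CLAIM (what is proved, stated in full; the proofs are below) =====
def Claim_equal_count_duplication_hints_py : Prop := ∀ (lines : List String), Dom_count_duplication_hints_py lines → Spec_count_duplication_hints_py lines (count_duplication_hints_py lines)

-- ===== LEMMAS AND PROOFS =====

-- the token stream: stripped, qualifying lines
def pvQual (s : String) : Bool :=
  !(s == "" || PySem.Str.startswith s "#" || PySem.Str.len s ≤ 5 || PySem.Set.contains pvCommon s)

def pvTokens (lines : List String) : List String :=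
  (lines.map PySem.Str.strip).filter pvQual

-- per-count contribution, total form h and marginal form g
def pvH (n : Nat) : Int := if 3 ≤ n then (n : Int) - 1 else 0
def pvG (c : Int) : Int := if c = 3 then 2 else if c > 3 then 1 else 0

def pvF (ys : List String) : Int :=
  ((PySem.Set.ofList ys).map (fun k => pvH (ys.count k))).sum

-- B's token-level step
def pvStepTok (st : PySem.Dict String Int × Int) (s : String) : PySem.Dict String Int × Int :=
  let c := st.1.getD s 0 + 1
  (st.1.insert s c, st.2 + pvG c)


-- generic fold/sum helpers
theorem pv_foldl_if_add {α : Type} (cond : α → Prop) [DecidablePred cond] (w : α → Int) :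
    ∀ (l : List α) (i : Int),
      l.foldl (fun acc x => if cond x then acc + w x else acc) i
        = i + (l.map (fun x => if cond x then w x else 0)).sum := by
  intro l
  induction l with
  | nil => intro i; simp
  | cons a l ih =>
    intro i
    simp only [List.foldl_cons, List.map_cons, List.sum_cons, ih]
    by_cases h : cond a <;> simp [h] <;> ring

theorem pv_sum_map_ite_filter {α : Type} (p : α → Bool) (f : α → Int) :
    ∀ l : List α, (l.map (fun k => if p k then f k else 0)).sum = ((l.filter p).map f).sum := by
  intro l
  induction l with
  | nil => simp
  | cons a l ih =>
    by_cases h : p a <;> simp [h, ih]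

theorem pv_sum_map_nodup_ne {α : Type} (t : α) (f g : α → Int) :
    ∀ l : List α, l.Nodup → t ∈ l → (∀ k ∈ l, k ≠ t → f k = g k) →
      (l.map f).sum = (l.map g).sum + (f t - g t) := by
  intro l
  induction l with
  | nil => intro _ h; simp at h
  | cons a l ih =>
    intro hn hm hfg
    rcases List.mem_cons.mp hm with rfl | hm
    · have : ∀ k ∈ l, f k = g k := by
        intro k hk
        exact hfg k (List.mem_cons_of_mem _ hk) (fun h => (List.nodup_cons.mp hn).1 (h ▸ hk))
      simp only [List.map_cons, List.sum_cons, List.map_congr_left this]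
      ring
    · have ha : a ≠ t := fun h => (List.nodup_cons.mp hn).1 (h ▸ hm)
      have := ih (List.nodup_cons.mp hn).2 hm (fun k hk => hfg k (List.mem_cons_of_mem _ hk))
      simp only [List.map_cons, List.sum_cons, this, hfg a (List.mem_cons_self) ha]
      ring

-- the boolean A applies after counting
def pvPb (s : String) : Bool :=
  decide (¬ PySem.Set.contains pvCommon s ∧ PySem.Str.len s > 5)

theorem pv_qual_eq (s : String) (h1 : ¬ s = "") (h2 : ¬ PySem.Str.startswith s "#" = true) :
    pvQual s = pvPb s := by
  unfold pvQual pvPb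
  cases hc : PySem.Set.contains pvCommon s <;>
    by_cases hl : PySem.Str.len s ≤ 5 <;>
      simp_all <;> omega

theorem pv_qual_false (s : String)
    (h : s = "" ∨ PySem.Str.startswith s "#" = true ∨ PySem.Str.len s ≤ 5 ∨ PySem.Set.contains pvCommon s = true) :
    pvQual s = false := by
  unfold pvQual
  rcases h with h | h | h | h <;> simp_all <;> omega

theorem pv_tokens_eq (lines : List String) :
    pvTokens lines
      = (lines.filterMap (fun l =>
          let s := PySem.Str.strip l
          if s ≠ "" ∧ ¬ PySem.Str.startswith s "#" then some s else none)).filter pvPb := by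
  induction lines with
  | nil => simp [pvTokens]
  | cons l ls ih =>
    simp only [pvTokens, List.map_cons, List.filter_cons, List.filterMap_cons] at ih ⊢
    by_cases hq : (PySem.Str.strip l ≠ "" ∧ ¬ PySem.Str.startswith (PySem.Str.strip l) "#" = true)
    · rw [if_pos hq]
      simp only [List.filter_cons]
      rw [pv_qual_eq _ hq.1 hq.2]
      cases pvPb (PySem.Str.strip l) <;> simp [ih]
    · rw [if_neg hq]
      have h' : PySem.Str.strip l = "" ∨ PySem.Str.startswith (PySem.Str.strip l) "#" = true ∨
          PySem.Str.len (PySem.Str.strip l) ≤ 5 ∨ PySem.Set.contains pvCommon (PySem.Str.strip l) = true := by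
        by_cases h1 : PySem.Str.strip l = ""
        · exact Or.inl h1
        · right; left
          by_contra h2
          exact hq ⟨h1, h2⟩
      rw [pv_qual_false _ h', if_neg (by simp)]
      exact ih

theorem pv_lemA (lines : List String) :
    count_duplication_hints_py lines = pvF (pvTokens lines) := by
  unfold count_duplication_hints_py
  simp only [PySem.Dict.items_counter]
  set xs := lines.filterMap (fun l =>
    let s := PySem.Str.strip l
    if s ≠ "" ∧ ¬ PySem.Str.startswith s "#" then some s else none) with hxs
  rw [pv_foldl_if_add (fun kv : String × Int => kv.2 ≥ 3 ∧ ¬ PySem.Set.contains pvCommon kv.1 ∧ PySem.Str.len kv.1 > 5) (fun kv => kv.2 - 1), zero_add, List.map_map]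
  have hterm : ∀ k : String,
      ((fun kv : String × Int => if kv.2 ≥ 3 ∧ ¬ PySem.Set.contains pvCommon kv.1 ∧ PySem.Str.len kv.1 > 5 then kv.2 - 1 else 0) ∘ (fun k => (k, (List.count k xs : Int)))) k
        = (if pvPb k then pvH (xs.count k) else 0) := by
    intro k
    simp only [Function.comp, pvPb, pvH]
    by_cases h3 : ¬ PySem.Set.contains pvCommon k ∧ PySem.Str.len k > 5 <;>
      by_cases hc : 3 ≤ xs.count k <;>
        simp [h3, hc] <;> try omega
  rw [List.map_congr_left (fun k _ => hterm k)]
  rw [pv_sum_map_ite_filter]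
  set ys := xs.filter pvPb with hys
  have hcnt : ∀ k ∈ (PySem.Set.ofList xs).filter pvPb, pvH (xs.count k) = pvH (ys.count k) := by
    intro k hk
    have hp : pvPb k := (List.mem_filter.mp hk).2
    rw [hys, List.count_filter hp]
  rw [List.map_congr_left hcnt]
  have hperm : ((PySem.Set.ofList xs).filter pvPb).Perm (PySem.Set.ofList ys) := by
    rw [List.perm_ext_iff_of_nodup ((PySem.Set.nodup_ofList xs).filter _) (PySem.Set.nodup_ofList ys)]
    intro a
    simp only [List.mem_filter, PySem.Set.mem_ofList, hys]
  rw [(hperm.map _).sum_eq, pv_tokens_eq, ← hxs, ← hys]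
  rfl

-- ==== B side ====

theorem pv_qual_true (s : String)
    (h1 : ¬ s = "") (h2 : ¬ PySem.Str.startswith s "#" = true)
    (h3 : ¬ PySem.Str.len s ≤ 5) (h4 : ¬ PySem.Set.contains pvCommon s = true) :
    pvQual s = true := by
  unfold pvQual
  simp_all <;> omega

theorem pv_stepB_eq (st : PySem.Dict String Int × Int) (l : String) :
    pvStepB st l = if pvQual (PySem.Str.strip l) then pvStepTok st (PySem.Str.strip l) else st := by
  by_cases hs : (PySem.Str.strip l = "" ∨ PySem.Str.startswith (PySem.Str.strip l) "#" = true ∨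
      PySem.Str.len (PySem.Str.strip l) ≤ 5 ∨ PySem.Set.contains pvCommon (PySem.Str.strip l) = true)
  · rw [pv_qual_false _ hs, if_neg (by simp)]
    unfold pvStepB
    simp only []
    rw [if_pos (by simpa using hs)]
  · push_neg at hs
    obtain ⟨h1, h2, h3, h4⟩ := hs
    rw [pv_qual_true _ h1 h2 (by omega) h4, if_pos rfl]
    unfold pvStepB pvStepTok pvG
    rw [if_neg (by push_neg; exact ⟨h1, h2, by omega, h4⟩)]
    by_cases hc3 : st.1.getD (PySem.Str.strip l) 0 + 1 = 3 <;>
      by_cases hc4 : st.1.getD (PySem.Str.strip l) 0 + 1 > 3 <;>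
        simp [hc3, hc4] <;> omega

theorem pv_foldB (lines : List String) :
    ∀ st, lines.foldl pvStepB st = (pvTokens lines).foldl pvStepTok st := by
  induction lines with
  | nil => intro st; simp [pvTokens]
  | cons l ls ih =>
    intro st
    simp only [List.foldl_cons, pv_stepB_eq, pvTokens, List.map_cons, List.filter_cons]
    by_cases h : pvQual (PySem.Str.strip l) <;> simp [h, ih, pvTokens]

theorem pv_pvF_append (ys : List String) (t : String) :
    pvF (ys ++ [t]) = pvF ys + pvG ((ys.count t : Int) + 1) := by
  have hof : PySem.Set.ofList (ys ++ [t]) = PySem.Set.add (PySem.Set.ofList ys) t := by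
    simp [PySem.Set.ofList_eq_foldl, List.foldl_append]
  have hcount : ∀ k, (ys ++ [t]).count k = ys.count k + if t = k then 1 else 0 := by
    intro k
    simp [List.count_append, List.count_singleton']
  by_cases hm : t ∈ ys
  · have hadd : PySem.Set.add (PySem.Set.ofList ys) t = PySem.Set.ofList ys := by
      unfold PySem.Set.add
      simp [hm]
    unfold pvF
    rw [hof, hadd]
    rw [pv_sum_map_nodup_ne t (fun k => pvH ((ys ++ [t]).count k)) (fun k => pvH (ys.count k))
        (PySem.Set.ofList ys) (PySem.Set.nodup_ofList ys)
        ((PySem.Set.mem_ofList ys t).mpr hm)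
        (by
          intro k _ hk
          show pvH ((ys ++ [t]).count k) = pvH (ys.count k)
          rw [hcount k, if_neg (fun h => hk h.symm), Nat.add_zero])]
    have hv : 1 ≤ ys.count t := List.count_pos_iff.mpr hm
    have hct : (ys ++ [t]).count t = ys.count t + 1 := by rw [hcount t, if_pos rfl]
    rw [hct]
    unfold pvH pvG
    split_ifs <;> push_cast <;> omega
  · have hadd : PySem.Set.add (PySem.Set.ofList ys) t = PySem.Set.ofList ys ++ [t] := by
      unfold PySem.Set.add
      simp [hm]
    have hc0 : ys.count t = 0 := List.count_eq_zero.mpr hm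
    unfold pvF
    rw [hof, hadd, List.map_append, List.sum_append]
    have hcongr : ∀ k ∈ PySem.Set.ofList ys, pvH ((ys ++ [t]).count k) = pvH (ys.count k) := by
      intro k hk
      have hne : t ≠ k := fun h => hm (h ▸ (PySem.Set.mem_ofList ys k).mp hk)
      rw [hcount k, if_neg hne, Nat.add_zero]
    rw [List.map_congr_left hcongr]
    simp only [List.map_cons, List.map_nil, List.sum_cons, List.sum_nil]
    rw [hcount t, if_pos rfl, hc0]
    simp [pvH, pvG]

theorem pv_invTok (ys : List String) :
    (∀ k, ((ys.foldl pvStepTok (PySem.Dict.empty, 0)).1).getD k 0 = (ys.count k : Int)) ∧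
      (ys.foldl pvStepTok (PySem.Dict.empty, 0)).2 = pvF ys := by
  induction ys using List.reverseRecOn with
  | nil => constructor <;> simp [PySem.Dict.getD_empty, pvF]
  | append_singleton ys t ih =>
    rw [List.foldl_append]
    obtain ⟨ihd, iht⟩ := ih
    constructor
    · intro k
      simp only [List.foldl_cons, List.foldl_nil, pvStepTok]
      by_cases hk : k = t
      · subst hk
        rw [PySem.Dict.getD_insert_self, ihd k, List.count_append]
        simp
      · rw [PySem.Dict.getD_insert_of_ne _ _ _ hk, ihd k, List.count_append]
        simp [List.count_singleton', Ne.symm hk]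
    · simp only [List.foldl_cons, List.foldl_nil, pvStepTok]
      rw [iht, ihd t, pv_pvF_append]

theorem pv_lemB (lines : List String) :
    count_duplication_hints_py_alt lines = pvF (pvTokens lines) := by
  unfold count_duplication_hints_py_alt
  rw [pv_foldB]
  exact (pv_invTok (pvTokens lines)).2

-- ===== VERDICT (by name: the statement is the Claim_ definition above) =====
theorem count_duplication_hints_py_spec : Claim_equal_count_duplication_hints_py := by
  intro lines _
  unfold Spec_count_duplication_hints_py
  rw [pv_lemA, pv_lemB]
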